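-- pv_equiv track=rewrite | github.com/MatteoCaldana/competitive-programming | hackerrank/climbing-the-leaderboard.py | evalScoreboard
-- ===== SOURCE A (Python) =====
-- def evalScoreboard(scores):
--     leaderboard = [0]
--
--     i = 1
--     while True:
--         while (i < len(scores)) and (scores[i] == scores[leaderboard[-1]]):
--             i += 1
--         if i >= len(scores):
--             break
--         leaderboard.append(i)
--
--     leaderboard.append(len(scores))
--     return leaderboard
-- ===== SOURCE B (Python) =====
-- def evalScoreboard(scores):
--     # Phase 1: run-length encode the scores into [value, count] pairs.
--     runs = []
--     for s in scores:
--         if runs and runs[-1][0] == s: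
--             runs[-1][1] += 1
--         else:
--             runs.append([s, 1])
--     # Phase 2: run start offsets are the exclusive prefix sums of the run
--     # lengths (position 0 always counts as a start); append the total length.
--     starts = [0]
--     for _, length in runs[:-1]:
--         starts.append(starts[-1] + length)
--     return starts + [len(scores)]
-- ===== Notes on version B (the rewrite author's own statement) =====
-- stated objective: alternative
-- what changed: B works in two staged passes on a different data structure: it first run-length encodes the scores into (value,count) pairs and then derives the leaderboard as exclusive prefix sums of the run lengths, replacing A's nested while-loops that skip index runs against the score at the last recorded index.
import Mathlib
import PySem

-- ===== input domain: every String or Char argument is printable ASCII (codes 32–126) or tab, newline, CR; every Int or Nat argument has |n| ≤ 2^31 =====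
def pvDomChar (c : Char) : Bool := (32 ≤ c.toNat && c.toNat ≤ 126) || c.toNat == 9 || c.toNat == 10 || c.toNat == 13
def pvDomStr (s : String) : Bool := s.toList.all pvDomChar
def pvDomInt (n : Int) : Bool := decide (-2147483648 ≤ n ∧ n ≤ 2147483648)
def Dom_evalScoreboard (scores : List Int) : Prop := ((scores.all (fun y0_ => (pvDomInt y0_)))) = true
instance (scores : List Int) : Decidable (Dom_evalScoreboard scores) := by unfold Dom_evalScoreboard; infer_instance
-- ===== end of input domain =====

-- B replaces A's index-skipping nested while-loops by two staged passes: a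
-- run-length encoding of the scores, then exclusive prefix sums of the run
-- lengths (alternative decomposition; same O(n) cost).

-- ===== PORT A =====
-- A's outer `while True` with its inner skip loop, transliterated: the inner
-- condition `scores[i] == scores[leaderboard[-1]]` decides whether to skip.
-- Indices stored in `lb` are always in range, so getD/getLastD never defaults.
def pvGoA (scores : List Int) (lb : List Int) (i : Nat) : List Int :=
  if i < scores.length then
    if scores.getD i 0 = scores.getD (lb.getLastD 0).toNat 0 then
      pvGoA scores lb (i + 1)
    else
      pvGoA scores (lb ++ [(i : Int)]) (i + 1)
  else
    lb ++ [(scores.length : Int)]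
termination_by scores.length - i
decreasing_by all_goals omega

def evalScoreboard (scores : List Int) : List Int := pvGoA scores [0] 1

-- ===== PORT B =====
-- Phase 1 of Source B: `runs[-1][1] += 1` is modelled by dropLast ++ [bumped last].
def pvRuns (scores : List Int) : List (Int × Nat) :=
  scores.foldl (fun runs s =>
    match runs.getLast? with
    | some (v, c) => if v = s then runs.dropLast ++ [(v, c + 1)] else runs ++ [(s, 1)]
    | none => [(s, 1)]) []

-- Phase 2 of Source B: starts = [0]; for run in runs[:-1]: starts.append(starts[-1]+len)
def evalScoreboard_alt (scores : List Int) : List Int :=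
  ((pvRuns scores).dropLast.foldl
      (fun st p => st ++ [st.getLastD 0 + (p.2 : Int)]) [0])
    ++ [(scores.length : Int)]

-- ===== PRECONDITION & SPEC =====
def Spec_evalScoreboard (scores : List Int) (out : List Int) : Prop := out = evalScoreboard_alt scores
instance (scores : List Int) (out : List Int) : Decidable (Spec_evalScoreboard scores out) := by unfold Spec_evalScoreboard; infer_instance

-- ===== CLAIM (what is proved, stated in full; the proofs are below) =====
def Claim_equal_evalScoreboard : Prop := ∀ (scores : List Int), Dom_evalScoreboard scores → Spec_evalScoreboard scores (evalScoreboard scores)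

-- ===== LEMMAS AND PROOFS =====

-- Canonical run-length encoding, recursively from the front.
def pvRLE : List Int → List (Int × Nat)
  | [] => []
  | s :: t => (s, 1 + (t.takeWhile (· == s)).length) :: pvRLE (t.dropWhile (· == s))
termination_by l => l.length
decreasing_by
  simp only [List.length_cons]
  exact Nat.lt_succ_of_le (List.length_dropWhile_le _ _)

-- A's loop from index i, listified: prev value, remaining suffix, current index.
def pvG (v : Int) (l : List Int) (i : Int) : List Int :=
  match l with
  | [] => [i]
  | s :: t => if s = v then pvG s t (i + 1) else i :: pvG s t (i + 1)

-- Prefix sums of run lengths from accumulator a.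
def pvSums (a : Int) : List (Int × Nat) → List Int
  | [] => []
  | p :: l => (a + p.2) :: pvSums (a + p.2) l

-- A's recursion target (index form), reused from the A-side bridge.
def pvGoB (scores : List Int) (i : Nat) : List Int :=
  if i < scores.length then
    if scores.getD i 0 = scores.getD (i - 1) 0 then
      pvGoB scores (i + 1)
    else
      (i : Int) :: pvGoB scores (i + 1)
  else
    [(scores.length : Int)]
termination_by scores.length - i
decreasing_by all_goals omega

-- A's loop equals pvGoB, given the invariant that the score at the last
-- recorded index equals the score at position i-1.
lemma pvGoA_eq (scores : List Int) :
    ∀ k i lb, 1 ≤ i → scores.length - i = k →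
      scores.getD (lb.getLastD 0).toNat 0 = scores.getD (i - 1) 0 →
      pvGoA scores lb i = lb ++ pvGoB scores i := by
  intro k
  induction k with
  | zero =>
      intro i lb h1 hk hinv
      rw [pvGoA, if_neg (by omega), pvGoB, if_neg (by omega)]
  | succ k ih =>
      intro i lb h1 hk hinv
      have hlt : i < scores.length := by omega
      rw [pvGoA, if_pos hlt, pvGoB, if_pos hlt]
      by_cases hc : scores.getD i 0 = scores.getD (i - 1) 0
      · have hc' : scores.getD i 0 = scores.getD (lb.getLastD 0).toNat 0 := by
          rw [hinv]; exact hc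
        rw [if_pos hc', if_pos hc]
        exact ih (i + 1) lb (by omega) (by omega) (by simpa using hinv.trans hc.symm)
      · have hc' : ¬ scores.getD i 0 = scores.getD (lb.getLastD 0).toNat 0 := by
          rw [hinv]; exact hc
        rw [if_neg hc', if_neg hc]
        rw [ih (i + 1) (lb ++ [(i : Int)]) (by omega) (by omega) (by simp)]
        simp

-- pvGoB in listified form.
lemma pvGoB_eq_pvG (scores : List Int) :
    ∀ k i, 1 ≤ i → i ≤ scores.length → scores.length - i = k →
      pvGoB scores i = pvG (scores.getD (i - 1) 0) (scores.drop i) (i : Int) := by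
  intro k
  induction k with
  | zero =>
      intro i h1 hle hk
      have : i = scores.length := by omega
      rw [pvGoB, if_neg (by omega), this]
      simp [pvG]
  | succ k ih =>
      intro i h1 hle hk
      have hlt : i < scores.length := by omega
      have hget : scores.getD i 0 = scores[i] := List.getD_eq_getElem scores 0 hlt
      rw [pvGoB, if_pos hlt, List.drop_eq_getElem_cons hlt, pvG, hget]
      have hrec := ih (i + 1) (by omega) (by omega) (by omega)
      have hidx : i + 1 - 1 = i := by omega
      rw [hidx, hget] at hrec
      push_cast at hrec
      rw [hrec]

-- Phase-1 foldl equals the canonical RLE (with an open last run).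
lemma pvRuns_go (l : List Int) :
    ∀ (runs : List (Int × Nat)) (v : Int) (c : Nat),
      l.foldl (fun runs s =>
        match runs.getLast? with
        | some (v, c) => if v = s then runs.dropLast ++ [(v, c + 1)] else runs ++ [(s, 1)]
        | none => [(s, 1)]) (runs ++ [(v, c)])
      = runs ++ (v, c + (l.takeWhile (· == v)).length) :: pvRLE (l.dropWhile (· == v)) := by
  induction l with
  | nil => intro runs v c; simp [pvRLE]
  | cons s t ih =>
      intro runs v c
      simp only [List.foldl_cons, List.getLast?_concat, List.dropLast_concat]
      by_cases h : v = s
      · subst h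
        rw [if_pos rfl]
        have := ih runs v (c + 1)
        simp only [List.takeWhile_cons, List.dropWhile_cons, beq_self_eq_true, if_pos] at *
        rw [this]
        simp only [List.length_cons]
        ring_nf
      · rw [if_neg h]
        have := ih (runs ++ [(v, c)]) s 1
        rw [this]
        have hb : ¬ (s == v) = true := by simpa [beq_iff_eq] using fun e => h e.symm
        simp [hb, pvRLE]

lemma pvRuns_eq_pvRLE (scores : List Int) : pvRuns scores = pvRLE scores := by
  cases scores with
  | nil => simp [pvRuns, pvRLE]
  | cons s t =>
      show t.foldl _ ([] ++ [(s, 1)]) = _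
      rw [pvRuns_go t [] s 1, pvRLE]
      simp

-- Phase-2 foldl equals pvSums.
lemma pvStarts_eq (l : List (Int × Nat)) :
    ∀ (st : List Int) (a : Int),
      l.foldl (fun st p => st ++ [st.getLastD 0 + (p.2 : Int)]) (st ++ [a])
        = st ++ [a] ++ pvSums a l := by
  induction l with
  | nil => intro st a; simp [pvSums]
  | cons p t ih =>
      intro st a
      simp only [List.foldl_cons, List.getLastD_concat]
      have : st ++ [a] ++ [a + (p.2 : Int)] = (st ++ [a]) ++ [a + (p.2 : Int)] := by simp
      rw [this, ih (st ++ [a]) (a + (p.2 : Int))]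
      simp [pvSums]

-- Main bridge: prefix sums of the RLE (current run open with c seen elements,
-- current position i, run start i - c) produce exactly pvG's output.
lemma pvM (l : List Int) :
    ∀ (v : Int) (c : Nat) (i : Int),
      pvSums (i - c) (((v, c + (l.takeWhile (· == v)).length) ::
          pvRLE (l.dropWhile (· == v))).dropLast) ++ [i + l.length]
        = pvG v l i := by
  induction l with
  | nil => intro v c i; simp [pvSums, pvRLE, pvG]
  | cons s t ih =>
      intro v c i
      by_cases h : s = v
      · subst h
        rw [pvG, if_pos rfl]
        have := ih s (c + 1) (i + 1)
        simp only [List.takeWhile_cons, List.dropWhile_cons, beq_self_eq_true, if_pos] at *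
        rw [← this]
        have e1 : i + 1 - ((c : Int) + 1) = i - c := by ring
        have e2 : (c : Int) + 1 + (t.takeWhile (· == s)).length
            = (c : Int) + (1 + (t.takeWhile (· == s)).length) := by ring
        have e3 : i + 1 + (t.length : Int) = i + ((t.length : Int) + 1) := by ring
        simp only [List.length_cons]
        push_cast
        rw [e1, e3]
        ring_nf
      · rw [pvG, if_neg h]
        have hb : ¬ (s == v) = true := by simpa [beq_iff_eq] using h
        simp only [List.takeWhile_cons, hb, if_neg, Bool.false_eq_true, not_false_eq_true,
          List.dropWhile_cons, List.length_nil]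
        -- takeWhile = [], dropWhile = s :: t
        rw [pvRLE]
        -- dropLast of a two-or-more list distributes
        simp only [List.dropLast_cons₂, pvSums, Nat.add_zero]
        have hic : i - (c : Int) + (c : Int) = i := by ring
        rw [hic]
        have := ih s 1 (i + 1)
        have e1 : i + 1 - ((1 : Nat) : Int) = i := by push_cast; ring
        rw [e1] at this
        have hlen : i + (((s :: t).length : Nat) : Int) = i + 1 + (t.length : Int) := by
          simp only [List.length_cons]; push_cast; ring
        rw [hlen, List.cons_append, this]

-- ===== VERDICT (by name: the statement is the Claim_ definition above) =====
theorem evalScoreboard_spec : Claim_equal_evalScoreboard := by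
  intro scores _
  unfold Spec_evalScoreboard evalScoreboard evalScoreboard_alt
  rw [pvRuns_eq_pvRLE]
  cases scores with
  | nil => rw [pvGoA]; simp [pvRLE]
  | cons s t =>
      rw [pvGoA_eq (s :: t) ((s :: t).length - 1) 1 [0] (by omega) rfl (by simp),
        pvGoB_eq_pvG (s :: t) ((s :: t).length - 1) 1 (by omega) (by simp) rfl]
      rw [pvRLE]
      have h0 : ((List.foldl (fun st p => st ++ [st.getLastD 0 + (p.2 : Int)]) [(0 : Int)]
          (((s, 1 + (t.takeWhile (· == s)).length) :: pvRLE (t.dropWhile (· == s))).dropLast))) =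
          [(0 : Int)] ++ pvSums 0 (((s, 1 + (t.takeWhile (· == s)).length) ::
            pvRLE (t.dropWhile (· == s))).dropLast) := by
        have := pvStarts_eq (((s, 1 + (t.takeWhile (· == s)).length) ::
          pvRLE (t.dropWhile (· == s))).dropLast) [] (0 : Int)
        simpa using this
      rw [h0]
      have hM := pvM t s 1 (1 : Int)
      have e0 : (1 : Int) - ((1 : Nat) : Int) = 0 := by norm_num
      have e1 : (1 : Int) + (t.length : Int) = (((s :: t).length : Nat) : Int) := by
        simp only [List.length_cons]; push_cast; ring
      rw [e0, e1] at hM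
      simp only [show (1 : Nat) - 1 = 0 from rfl, List.getD_cons_zero, List.drop_one, List.tail_cons, Nat.cast_one]
      rw [← hM]
      simp
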